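-- pv_equiv track=rewrite | github.com/rikire/HOMEWORKS | rikire(бывший реп)/учеба/дз по инфе/RLE/RLE_reforged.py | search
-- ===== SOURCE A (Python) =====
-- def search(s, a):
--     k = 0
--     for i in s:
--         if i == a:
--             k += 1
--             continue
--         break
--     return k
-- ===== SOURCE B (Python) =====
-- def search(s, a):
--     # len(a) != 1: a single character can never == a, so the leading run is empty.
--     if len(a) != 1:
--         return 0
--     # lstrip(a) removes exactly the leading characters equal to a (a is one char),
--     # so the count of leading matches is the length difference.
--     return len(s) - len(s.lstrip(a))
-- ===== Notes on version B (the rewrite author's own statement) =====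
-- stated objective: alternative
-- what changed: B has no loop or counter: it computes the leading-run length arithmetically as len(s) - len(s.lstrip(a)) (guarding len(a) != 1, where a character can never equal a), instead of A's per-character compare-and-break loop.
import Mathlib
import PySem

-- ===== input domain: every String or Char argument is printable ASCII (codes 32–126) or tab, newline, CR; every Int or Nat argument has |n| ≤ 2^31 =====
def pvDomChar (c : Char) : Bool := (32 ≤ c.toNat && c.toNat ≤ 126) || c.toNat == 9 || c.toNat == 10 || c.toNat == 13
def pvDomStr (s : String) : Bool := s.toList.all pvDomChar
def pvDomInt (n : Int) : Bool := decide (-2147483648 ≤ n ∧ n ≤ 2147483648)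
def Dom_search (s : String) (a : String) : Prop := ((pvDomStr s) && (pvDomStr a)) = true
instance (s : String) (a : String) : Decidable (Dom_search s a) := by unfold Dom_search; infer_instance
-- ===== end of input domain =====

-- B is loop-free: it computes the leading-run length as len(s) - len(s.lstrip(a))
-- (guarded by len(a) != 1), instead of A's per-character compare-and-break loop.

-- ===== PORT A =====
-- A's loop: walk the characters, increment k while the one-char string equals a, break on first mismatch.
def searchLoop (a : String) : List Char → Int
  | [] => 0
  | c :: r => if String.ofList [c] = a then 1 + searchLoop a r else 0

def search (s : String) (a : String) : Int := searchLoop a s.toList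

-- ===== PORT B =====
-- lstrip(a) with a one-char argument is ported by hand as dropWhile of membership in a's
-- characters — exact for str.lstrip(chars), which drops leading characters contained in chars.
def search_alt (s : String) (a : String) : Int :=
  if a.toList.length ≠ 1 then 0
  else (s.toList.length : Int) - ((s.toList.dropWhile (fun c => decide (c ∈ a.toList))).length : Int)

-- ===== PRECONDITION & SPEC =====
def Spec_search (s : String) (a : String) (out : Int) : Prop := out = search_alt s a
instance (s : String) (a : String) (out : Int) : Decidable (Spec_search s a out) := by unfold Spec_search; infer_instance

-- ===== CLAIM (what is proved, stated in full; the proofs are below) =====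
def Claim_equal_search : Prop := ∀ (s : String) (a : String), Dom_search s a → Spec_search s a (search s a)

-- ===== LEMMAS AND PROOFS =====
theorem ofList_singleton_eq_iff (c : Char) (a : String) :
    String.ofList [c] = a ↔ a.toList = [c] := by
  constructor
  · intro h; rw [← h]; simp
  · intro h
    have := congrArg String.ofList h
    simpa using this.symm

theorem searchLoop_eq_takeWhile (a : String) (l : List Char) :
    searchLoop a l = ((l.takeWhile (fun c => decide (String.ofList [c] = a))).length : Int) := by
  induction l with
  | nil => simp [searchLoop]
  | cons c r ih =>
    by_cases h : String.ofList [c] = a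
    · simp [searchLoop, h, List.takeWhile, ih]; ring
    · simp [searchLoop, h, List.takeWhile]

-- ===== VERDICT (by name: the statement is the Claim_ definition above) =====
theorem search_spec : Claim_equal_search := by
  intro s a _
  unfold Spec_search search search_alt
  rw [searchLoop_eq_takeWhile]
  by_cases hlen : a.toList.length = 1
  · obtain ⟨ch, hch⟩ : ∃ ch, a.toList = [ch] := by
      cases h : a.toList with
      | nil => simp [h] at hlen
      | cons x t =>
        cases t with
        | nil => exact ⟨x, rfl⟩
        | cons y t' => simp [h] at hlen
    have hpred : (fun c => decide (String.ofList [c] = a)) = (fun c => decide (c ∈ a.toList)) := by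
      funext c
      simp [ofList_singleton_eq_iff, hch]
      constructor <;> intro h <;> simp_all
    rw [hpred]
    have hsplit := congrArg List.length
      (List.takeWhile_append_dropWhile (p := fun c => decide (c ∈ a.toList)) (l := s.toList))
    simp only [List.length_append] at hsplit
    have hsl : s.toList.length = s.length := by simp
    simp [hlen]
    omega
  · have hpred : (fun c => decide (String.ofList [c] = a)) = (fun _ : Char => false) := by
      funext c
      simp [ofList_singleton_eq_iff]
      intro h
      rw [h] at hlen; simp at hlen
    rw [hpred, if_pos]
    · simp
    · exact hlen
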